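-- pv_equiv track=rewrite | github.com/Pratinav-Shrivastava/codeforces | CP31/900/B_NIT_Destroys_the_Universe.py | thanos
-- ===== SOURCE A (Python) =====
-- def thanos(nums):
--     n = len(nums)
--     any_nz = False
--     for x in nums:
--         if x != 0:
--             any_nz = True
--             break
--     if not any_nz:
--         return 0
--
--     L = 0
--     while L < n and nums[L] == 0:
--         L += 1
--     R = n - 1
--     while R >= 0 and nums[R] == 0:
--         R -= 1
--
--     for i in range(L, R + 1):
--         if nums[i] == 0:
--             return 2
--     return 1
-- ===== SOURCE B (Python) =====
-- def thanos(nums):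
--     idx = [i for i, x in enumerate(nums) if x != 0]
--     if not idx:
--         return 0
--     return 1 if idx[-1] - idx[0] + 1 == len(idx) else 2
-- ===== Notes on version B (the rewrite author's own statement) =====
-- stated objective: simpler
-- what changed: Replaces A's first-nonzero flag loop, two inward while-walks and interior zero scan with a single gather of nonzero indices plus the span-equals-count contiguity test.
import Mathlib
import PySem

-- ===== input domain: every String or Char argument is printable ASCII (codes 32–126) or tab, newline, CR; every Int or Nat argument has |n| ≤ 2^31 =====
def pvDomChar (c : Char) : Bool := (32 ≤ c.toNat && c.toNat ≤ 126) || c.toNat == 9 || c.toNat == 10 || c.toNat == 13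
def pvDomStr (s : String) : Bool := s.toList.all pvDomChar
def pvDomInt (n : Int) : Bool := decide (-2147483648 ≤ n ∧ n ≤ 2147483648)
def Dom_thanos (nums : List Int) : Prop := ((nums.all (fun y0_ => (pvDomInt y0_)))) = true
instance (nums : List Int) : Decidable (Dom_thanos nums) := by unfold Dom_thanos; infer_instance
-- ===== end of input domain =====

-- B replaces A's flag loop, two inward while-walks and interior zero scan by one gather of
-- nonzero indices plus a span-equals-count test (objective: simpler; same O(n) cost).

-- ===== PORT A =====
-- while L < n and nums[L] == 0: L += 1   (L starts at 0, so a Nat index; in-range access is getD)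
def loopL (nums : List Int) (L : Nat) : Nat :=
  if h : L < nums.length ∧ nums.getD L 1 = 0 then loopL nums (L + 1) else L
termination_by nums.length - L
decreasing_by obtain ⟨h1, -⟩ := h; omega

-- while R >= 0 and nums[R] == 0: R -= 1   (R can reach -1, so an Int index)
def loopR (nums : List Int) (R : Int) : Int :=
  if h : 0 ≤ R ∧ nums.getD R.toNat 1 = 0 then loopR nums (R - 1) else R
termination_by (R + 1).toNat
decreasing_by obtain ⟨h1, -⟩ := h; omega

-- for i in range(L, R + 1): if nums[i] == 0: return 2 / return 1
def scanZ (nums : List Int) (i : Nat) (R : Int) : Int :=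
  if h : (i : Int) ≤ R then (if nums.getD i 1 = 0 then 2 else scanZ nums (i + 1) R) else 1
termination_by (R + 1 - i).toNat
decreasing_by omega

def thanos (nums : List Int) : Int :=
  let n := nums.length
  let any_nz := nums.any (fun x => x != 0)
  if any_nz = false then 0
  else
    let L := loopL nums 0
    let R := loopR nums ((n : Int) - 1)
    scanZ nums L R

-- ===== PORT B =====
def thanos_alt (nums : List Int) : Int :=
  let idx := ((PySem.List.enumerate nums).filter (fun q => q.2 != 0)).map Prod.fst
  if idx = [] then 0
  else if PySem.List.pyGetD idx (-1) 0 - PySem.List.pyGetD idx 0 0 + 1 = (idx.length : Int)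
    then 1 else 2

-- ===== PRECONDITION & SPEC =====
def Spec_thanos (nums : List Int) (out : Int) : Prop := out = thanos_alt nums
instance (nums : List Int) (out : Int) : Decidable (Spec_thanos nums out) := by unfold Spec_thanos; infer_instance

-- ===== CLAIM (what is proved, stated in full; the proofs are below) =====
def Claim_equal_thanos : Prop := ∀ (nums : List Int), Dom_thanos nums → Spec_thanos nums (thanos nums)

-- ===== LEMMAS AND PROOFS =====

-- proof-side skeleton of B's index gather
def idxs : List Int → Int → List Int
  | [], _ => []
  | x :: xs, s => if x != 0 then s :: idxs xs (s + 1) else idxs xs (s + 1)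

theorem idxs_eq : ∀ (nums : List Int) (s : Int),
    ((PySem.List.enumerate nums s).filter (fun q => q.2 != 0)).map Prod.fst = idxs nums s := by
  intro nums
  induction nums with
  | nil => intro s; simp [idxs, PySem.List.enumerate_nil]
  | cons x xs ih =>
    intro s
    by_cases hx : x != 0 <;>
      simp [idxs, PySem.List.enumerate_cons, hx, ih]

theorem thanos_alt_eq (nums : List Int) :
    thanos_alt nums = (if idxs nums 0 = [] then 0
      else if PySem.List.pyGetD (idxs nums 0) (-1) 0 - PySem.List.pyGetD (idxs nums 0) 0 0 + 1
          = ((idxs nums 0).length : Int) then 1 else 2) := by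
  simp only [thanos_alt, idxs_eq]

theorem idxs_append : ∀ (u v : List Int) (s : Int),
    idxs (u ++ v) s = idxs u s ++ idxs v (s + u.length) := by
  intro u
  induction u with
  | nil => intro v s; simp [idxs]
  | cons x xs ih =>
    intro v s
    by_cases hx : x != 0 <;> simp [idxs, hx, ih, add_assoc] <;> ring_nf
  
theorem idxs_shift : ∀ (xs : List Int) (s t : Int),
    idxs xs (s + t) = (idxs xs s).map (· + t) := by
  intro xs
  induction xs with
  | nil => intro s t; simp [idxs]
  | cons x xs ih =>
    intro s t
    have h1 : s + t + 1 = (s + 1) + t := by ring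
    by_cases hx : x != 0 <;> simp [idxs, hx] <;> rw [h1, ih (s + 1) t]

theorem idxs_nil_iff : ∀ (xs : List Int) (s : Int),
    idxs xs s = [] ↔ xs.any (fun x => x != 0) = false := by
  intro xs
  induction xs with
  | nil => intro s; simp [idxs]
  | cons x xs ih =>
    intro s
    by_cases hx : x != 0 <;> simp [idxs, hx, ih]

theorem length_idxs : ∀ (xs : List Int) (s : Int),
    (idxs xs s).length = xs.countP (fun x => x != 0) := by
  intro xs
  induction xs with
  | nil => intro s; simp [idxs]
  | cons x xs ih =>
    intro s
    by_cases hx : x != 0 <;> simp [idxs, hx, ih]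

-- ---- loopL lemmas ----
theorem loopL_cons_succ (y : Int) (xs : List Int) :
    ∀ (k L : Nat), xs.length - L ≤ k → loopL (y :: xs) (L + 1) = loopL xs L + 1 := by
  intro k
  induction k with
  | zero =>
    intro L h
    rw [loopL.eq_def (y :: xs) (L + 1), loopL.eq_def xs L]
    rw [dif_neg (fun hc : _ ∧ _ => absurd hc.1 (by simp; omega)),
        dif_neg (fun hc : _ ∧ _ => absurd hc.1 (by omega))]
  | succ k ih =>
    intro L h
    rw [loopL.eq_def (y :: xs) (L + 1), loopL.eq_def xs L]
    by_cases hc : L < xs.length ∧ xs.getD L 1 = 0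
    · rw [dif_pos ⟨by simp; omega, by simpa using hc.2⟩, dif_pos hc]
      exact ih (L + 1) (by omega)
    · rw [dif_neg (fun hd => hc ⟨by simpa using hd.1, by simpa using hd.2⟩), dif_neg hc]

theorem loopL_zero_cons (xs : List Int) : loopL ((0 : Int) :: xs) 0 = loopL xs 0 + 1 := by
  rw [loopL.eq_def ((0 : Int) :: xs) 0]
  rw [dif_pos ⟨by simp, by simp⟩]
  exact loopL_cons_succ 0 xs xs.length 0 (by omega)

theorem loopL_head_ne (y : Int) (xs : List Int) (hy : y ≠ 0) : loopL (y :: xs) 0 = 0 := by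
  rw [loopL.eq_def (y :: xs) 0]
  rw [dif_neg (fun hc : _ ∧ _ => hy (by simpa using hc.2))]

theorem loopL_append (xs zs : List Int) :
    ∀ (k L : Nat), xs.length - L ≤ k → (xs.drop L).any (fun x => x != 0) →
      loopL (xs ++ zs) L = loopL xs L := by
  intro k
  induction k with
  | zero =>
    intro L h hany
    exfalso
    rw [List.drop_eq_nil_of_le (by omega)] at hany
    simp at hany
  | succ k ih =>
    intro L h hany
    have hL : L < xs.length := by
      by_contra hge
      rw [List.drop_eq_nil_of_le (by omega)] at hany
      simp at hany
    have hg : (xs ++ zs).getD L 1 = xs.getD L 1 := List.getD_append _ _ _ _ hL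
    rw [loopL.eq_def (xs ++ zs) L, loopL.eq_def xs L]
    by_cases hz : xs.getD L 1 = 0
    · rw [dif_pos ⟨by simp; omega, by rw [hg]; exact hz⟩, dif_pos ⟨hL, hz⟩]
      apply ih (L + 1) (by omega)
      rw [List.drop_eq_getElem_cons hL] at hany
      have : xs[L] = 0 := by rw [← List.getD_eq_getElem xs 1 hL]; exact hz
      simpa [this] using hany
    · rw [dif_neg (fun hd => hz (by rw [← hg]; exact hd.2)), dif_neg (fun hd => hz hd.2)]

-- ---- loopR lemmas ----
theorem loopR_le (xs : List Int) : ∀ (k : Nat) (R : Int), (R + 1).toNat ≤ k → loopR xs R ≤ R := by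
  intro k
  induction k with
  | zero =>
    intro R h
    rw [loopR.eq_def xs R]
    rw [dif_neg (fun hc : _ ∧ _ => absurd hc.1 (by omega))]
  | succ k ih =>
    intro R h
    rw [loopR.eq_def xs R]
    by_cases hc : 0 ≤ R ∧ xs.getD R.toNat 1 = 0
    · rw [dif_pos hc]
      have := ih (R - 1) (by omega)
      omega
    · rw [dif_neg hc]

theorem loopR_cons_succ (y : Int) (xs : List Int) :
    ∀ (k : Nat) (R : Int), (R + 1).toNat ≤ k → R < xs.length →
      (xs.take (R + 1).toNat).any (fun x => x != 0) →
      loopR (y :: xs) (R + 1) = loopR xs R + 1 := by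
  intro k
  induction k with
  | zero =>
    intro R h hR hany
    exfalso
    have : (R + 1).toNat = 0 := by omega
    rw [this] at hany
    simp at hany
  | succ k ih =>
    intro R h hR hany
    have hR0 : 0 ≤ R := by
      by_contra hneg
      have : (R + 1).toNat = 0 := by omega
      rw [this] at hany
      simp at hany
    have hRlen : R.toNat < xs.length := by omega
    have htn : (R + 1).toNat = R.toNat + 1 := by omega
    have hg : (y :: xs).getD (R + 1).toNat 1 = xs.getD R.toNat 1 := by
      rw [htn, List.getD_cons_succ]
    rw [loopR.eq_def (y :: xs) (R + 1), loopR.eq_def xs R]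
    by_cases hz : xs.getD R.toNat 1 = 0
    · rw [dif_pos ⟨by omega, by rw [hg]; exact hz⟩, dif_pos ⟨hR0, hz⟩]
      have e1 : R + 1 - 1 = (R - 1) + 1 := by ring
      rw [e1]
      apply ih (R - 1) (by omega) (by omega)
      rw [htn, List.take_add_one] at hany
      have hgetE : xs[R.toNat] = 0 := by rw [← List.getD_eq_getElem xs 1 hRlen]; exact hz
      have : xs[R.toNat]?.toList = [xs[R.toNat]] := by simp [List.getElem?_eq_getElem hRlen]
      rw [this] at hany
      simpa [hgetE] using hany
    · rw [dif_neg (fun hd : _ ∧ _ => hz (by rw [← hg]; exact hd.2)),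
          dif_neg (fun hd : _ ∧ _ => hz hd.2)]

theorem loopR_append (xs zs : List Int) :
    ∀ (k : Nat) (R : Int), (R + 1).toNat ≤ k → R < xs.length →
      loopR (xs ++ zs) R = loopR xs R := by
  intro k
  induction k with
  | zero =>
    intro R h hR
    rw [loopR.eq_def (xs ++ zs) R, loopR.eq_def xs R]
    rw [dif_neg (fun hc : _ ∧ _ => absurd hc.1 (by omega)),
        dif_neg (fun hc : _ ∧ _ => absurd hc.1 (by omega))]
  | succ k ih =>
    intro R h hR
    rw [loopR.eq_def (xs ++ zs) R, loopR.eq_def xs R]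
    by_cases hR0 : 0 ≤ R
    · have hRlen : R.toNat < xs.length := by omega
      have hg : (xs ++ zs).getD R.toNat 1 = xs.getD R.toNat 1 := List.getD_append _ _ _ _ hRlen
      by_cases hz : xs.getD R.toNat 1 = 0
      · rw [dif_pos ⟨hR0, by rw [hg]; exact hz⟩, dif_pos ⟨hR0, hz⟩]
        exact ih (R - 1) (by omega) (by omega)
      · rw [dif_neg (fun hd : _ ∧ _ => hz (by rw [← hg]; exact hd.2)),
            dif_neg (fun hd : _ ∧ _ => hz hd.2)]
    · rw [dif_neg (fun hc : _ ∧ _ => hR0 hc.1), dif_neg (fun hc : _ ∧ _ => hR0 hc.1)]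

theorem loopR_concat_ne (xs : List Int) (w : Int) (hw : w ≠ 0) :
    loopR (xs ++ [w]) (xs.length : Int) = (xs.length : Int) := by
  rw [loopR.eq_def (xs ++ [w]) (xs.length : Int)]
  rw [dif_neg]
  intro hc
  apply hw
  have hg : (xs ++ [w]).getD ((xs.length : Int)).toNat 1 = w := by
    have : ((xs.length : Int)).toNat = xs.length := by omega
    rw [this, List.getD_append_right _ _ _ _ (le_refl _)]
    simp
  rw [← hg]
  exact hc.2

-- ---- scanZ lemmas ----
theorem scanZ_cons_succ (y : Int) (xs : List Int) :
    ∀ (k i : Nat) (R : Int), (R + 1 - i).toNat ≤ k →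
      scanZ (y :: xs) (i + 1) (R + 1) = scanZ xs i R := by
  intro k
  induction k with
  | zero =>
    intro i R h
    rw [scanZ.eq_def (y :: xs) (i + 1) (R + 1), scanZ.eq_def xs i R]
    rw [dif_neg (by push_cast; omega), dif_neg (by omega)]
  | succ k ih =>
    intro i R h
    rw [scanZ.eq_def (y :: xs) (i + 1) (R + 1), scanZ.eq_def xs i R]
    by_cases hle : (i : Int) ≤ R
    · rw [dif_pos (by push_cast; omega), dif_pos hle]
      rw [List.getD_cons_succ]
      by_cases hz : xs.getD i 1 = 0
      · rw [if_pos hz, if_pos hz]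
      · rw [if_neg hz, if_neg hz]
        exact ih (i + 1) R (by omega)
    · rw [dif_neg (by push_cast; omega), dif_neg hle]

theorem scanZ_append (xs zs : List Int) :
    ∀ (k i : Nat) (R : Int), (R + 1 - i).toNat ≤ k → R < xs.length →
      scanZ (xs ++ zs) i R = scanZ xs i R := by
  intro k
  induction k with
  | zero =>
    intro i R h hR
    rw [scanZ.eq_def (xs ++ zs) i R, scanZ.eq_def xs i R]
    rw [dif_neg (by omega), dif_neg (by omega)]
  | succ k ih =>
    intro i R h hR
    rw [scanZ.eq_def (xs ++ zs) i R, scanZ.eq_def xs i R]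
    by_cases hle : (i : Int) ≤ R
    · have hi : i < xs.length := by omega
      have hg : (xs ++ zs).getD i 1 = xs.getD i 1 := List.getD_append _ _ _ _ hi
      rw [dif_pos hle, dif_pos hle, hg]
      by_cases hz : xs.getD i 1 = 0
      · rw [if_pos hz, if_pos hz]
      · rw [if_neg hz, if_neg hz]
        exact ih (i + 1) R (by omega) hR
    · rw [dif_neg hle, dif_neg hle]

theorem scanZ_all (xs : List Int) :
    ∀ (k i : Nat), xs.length - i ≤ k →
      scanZ xs i ((xs.length : Int) - 1) =
        if (xs.drop i).all (fun x => x != 0) then 1 else 2 := by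
  intro k
  induction k with
  | zero =>
    intro i h
    rw [scanZ.eq_def xs i ((xs.length : Int) - 1)]
    rw [dif_neg (by omega), List.drop_eq_nil_of_le (by omega)]
    simp
  | succ k ih =>
    intro i h
    by_cases hi : i < xs.length
    · rw [scanZ.eq_def xs i ((xs.length : Int) - 1)]
      rw [dif_pos (by omega)]
      have hdrop : xs.drop i = xs[i] :: xs.drop (i + 1) := List.drop_eq_getElem_cons hi
      by_cases hz : xs.getD i 1 = 0
      · rw [if_pos hz]
        have hgz : xs[i] = 0 := by rw [← List.getD_eq_getElem xs 1 hi]; exact hz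
        rw [hdrop]
        simp [hgz]
      · rw [if_neg hz, ih (i + 1) (by omega), hdrop, List.all_cons]
        have hne : xs[i] ≠ 0 := by rw [← List.getD_eq_getElem xs 1 hi]; exact hz
        simp [hne]
    · rw [scanZ.eq_def xs i ((xs.length : Int) - 1)]
      rw [dif_neg (by omega), List.drop_eq_nil_of_le (by omega)]
      simp

-- ---- unfolding of A's top level ----
theorem thanos_of_any (nums : List Int) (h : nums.any (fun x => x != 0) = true) :
    thanos nums = scanZ nums (loopL nums 0) (loopR nums ((nums.length : Int) - 1)) := by
  simp [thanos, h]

theorem thanos_of_not_any (nums : List Int) (h : nums.any (fun x => x != 0) = false) :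
    thanos nums = 0 := by
  simp [thanos, h]

-- ---- B peeling ----
theorem alt_cons_zero (xs : List Int) : thanos_alt ((0 : Int) :: xs) = thanos_alt xs := by
  rw [thanos_alt_eq, thanos_alt_eq]
  have h0 : idxs ((0 : Int) :: xs) 0 = (idxs xs 0).map (· + 1) := by
    have hs : idxs xs (0 + 1) = (idxs xs 0).map (· + 1) := idxs_shift xs 0 1
    simpa [idxs] using hs
  rw [h0]
  rcases heq : idxs xs 0 with _ | ⟨a, t⟩
  · simp
  · have hne : (a :: t) ≠ ([] : List Int) := by simp
    have hnem : ((a :: t).map (· + 1)) ≠ ([] : List Int) := by simp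
    rw [if_neg hnem, if_neg hne]
    rw [PySem.List.pyGetD_neg_one _ _ hnem, PySem.List.pyGetD_neg_one _ _ hne]
    have hlast : ((a :: t).map (· + 1)).getLast hnem = (a :: t).getLast hne + 1 :=
      List.getLast_map hnem
    rw [hlast, List.map_cons, PySem.List.pyGetD_zero_cons, PySem.List.pyGetD_zero_cons]
    simp only [List.length_map, List.length_cons]
    by_cases hcc : (a :: t).getLast hne - a + 1 = ((t.length + 1 : Nat) : Int)
    · rw [if_pos (by omega), if_pos (by omega)]
    · rw [if_neg (by omega), if_neg (by omega)]

theorem alt_concat_zero (u : List Int) : thanos_alt (u ++ [(0 : Int)]) = thanos_alt u := by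
  rw [thanos_alt_eq, thanos_alt_eq]
  have h0 : idxs (u ++ [(0 : Int)]) 0 = idxs u 0 := by
    rw [idxs_append]; simp [idxs]
  rw [h0]

-- ---- main induction ----
theorem thanos_eq_alt : ∀ (nums : List Int), thanos nums = thanos_alt nums := by
  have key : ∀ (n : Nat) (nums : List Int), nums.length ≤ n → thanos nums = thanos_alt nums := by
    intro n
    induction n with
    | zero =>
      intro nums h
      have hnil : nums = [] := List.eq_nil_of_length_eq_zero (by omega)
      subst hnil
      decide
    | succ n IH =>
      intro nums hlen
      by_cases hany : nums.any (fun x => x != 0) = true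
      · obtain ⟨y, xs, rfl⟩ : ∃ y xs, nums = y :: xs := by
          cases nums with
          | nil => simp at hany
          | cons a l => exact ⟨a, l, rfl⟩
        by_cases hy : y = 0
        · subst hy
          have hxs : xs.any (fun x => x != 0) = true := by simpa using hany
          rw [thanos_of_any _ hany, loopL_zero_cons]
          rw [show ((((0 : Int) :: xs).length : Int) - 1) = ((xs.length : Int) - 1) + 1 from by
            simp only [List.length_cons]; push_cast; ring]
          rw [loopR_cons_succ 0 xs xs.length ((xs.length : Int) - 1) (by omega) (by omega)
            (by rw [show (((xs.length : Int) - 1) + 1).toNat = xs.length from by omega,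
                    List.take_length]; exact hxs)]
          rw [scanZ_cons_succ 0 xs
            ((loopR xs ((xs.length : Int) - 1) + 1 - (loopL xs 0)).toNat)
            (loopL xs 0) (loopR xs ((xs.length : Int) - 1)) (le_refl _)]
          rw [← thanos_of_any xs hxs, IH xs (by simp at hlen; omega)]
          exact (alt_cons_zero xs).symm
        · obtain ⟨u, w, huw⟩ : ∃ u w, y :: xs = u ++ [w] := by
            rcases List.eq_nil_or_concat (y :: xs) with h | ⟨u, w, h⟩
            · simp at h
            · exact ⟨u, w, by simpa [List.concat_eq_append] using h⟩
          rw [huw] at hany hlen ⊢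
          by_cases hw : w = 0
          · subst hw
            have hu : u.any (fun x => x != 0) = true := by simpa using hany
            rw [thanos_of_any _ hany, alt_concat_zero]
            rw [loopL_append u [0] u.length 0 (by omega) (by simpa using hu)]
            rw [show (((u ++ [(0 : Int)]).length : Int) - 1) = (u.length : Int) from by
              simp]
            have hR1 : loopR (u ++ [(0 : Int)]) (u.length : Int)
                = loopR u ((u.length : Int) - 1) := by
              rw [loopR.eq_def]
              rw [dif_pos ⟨by omega, by
                rw [show (((u.length : Nat) : Int)).toNat = u.length from by omega,
                    List.getD_append_right _ _ _ _ (le_refl _)]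
                simp⟩]
              exact loopR_append u [0] u.length ((u.length : Int) - 1) (by omega) (by omega)
            rw [hR1]
            have hRle := loopR_le u u.length ((u.length : Int) - 1) (by omega)
            rw [scanZ_append u [0]
              ((loopR u ((u.length : Int) - 1) + 1 - (loopL u 0)).toNat)
              (loopL u 0) (loopR u ((u.length : Int) - 1)) (le_refl _) (by omega)]
            rw [← thanos_of_any u hu]
            exact IH u (by simp at hlen; omega)
          · -- base case: first and last element nonzero
            rw [thanos_of_any _ hany]
            have hL0 : loopL (u ++ [w]) 0 = 0 := by
              rw [← huw]; exact loopL_head_ne y xs hy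
            have e3 : (((u ++ [w]).length : Int) - 1) = (u.length : Int) := by simp
            rw [hL0, e3, loopR_concat_ne u w hw]
            have hscan := scanZ_all (u ++ [w]) (u ++ [w]).length 0 (by omega)
            rw [e3] at hscan
            simp only [List.drop_zero] at hscan
            rw [hscan]
            rw [thanos_alt_eq]
            have hI1 : idxs (u ++ [w]) 0 = idxs u 0 ++ [(u.length : Int)] := by
              rw [idxs_append]; simp [idxs, hw]
            have hIne : idxs (u ++ [w]) 0 ≠ [] := by rw [hI1]; simp
            rw [if_neg hIne]
            have hlast : PySem.List.pyGetD (idxs (u ++ [w]) 0) (-1) 0 = (u.length : Int) := by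
              rw [hI1]; exact PySem.List.pyGetD_neg_one_append_singleton _ _ _
            have hI2 : idxs (u ++ [w]) 0 = 0 :: idxs xs 1 := by
              rw [← huw]; simp [idxs, hy]
            have hhead : PySem.List.pyGetD (idxs (u ++ [w]) 0) 0 0 = 0 := by
              rw [hI2]; exact PySem.List.pyGetD_zero_cons _ _ _
            rw [hlast, hhead, length_idxs]
            have hlen2 : (u ++ [w]).length = u.length + 1 := by simp
            by_cases hall : ((u ++ [w]).all (fun x => x != 0)) = true
            · rw [if_pos hall, if_pos]
              have hc : (u ++ [w]).countP (fun x => x != 0) = (u ++ [w]).length :=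
                List.countP_eq_length.mpr (List.all_eq_true.mp hall)
              rw [hc, hlen2]; push_cast; ring
            · rw [if_neg hall, if_neg]
              intro hceq
              apply hall
              have hle := List.countP_le_length (p := fun x : Int => x != 0) (l := u ++ [w])
              have hcnt : (u ++ [w]).countP (fun x => x != 0) = (u ++ [w]).length := by
                omega
              exact List.all_eq_true.mpr (List.countP_eq_length.mp hcnt)
      · have hf : nums.any (fun x => x != 0) = false := by simpa using hany
        rw [thanos_of_not_any nums hf, thanos_alt_eq,
            if_pos ((idxs_nil_iff nums 0).mpr hf)]
  intro nums
  exact key nums.length nums (le_refl _)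

-- ===== VERDICT (by name: the statement is the Claim_ definition above) =====
theorem thanos_spec : Claim_equal_thanos := by
  intro nums _
  unfold Spec_thanos
  exact thanos_eq_alt nums
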